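-- pv_equiv track=rewrite | github.com/shagyeong/solvedac | pyhton/티어별 풀이/28. Bronze3/1284 집 주소.py | wideofplate
-- ===== SOURCE A (Python) =====
-- def wideofplate(array):
--     wideofplate = 1
--     for i in array:
--         if i == "0":
--             wideofplate += 5
--         elif i == "1":
--             wideofplate += 3
--         else:
--             wideofplate += 4
--     return wideofplate
-- ===== SOURCE B (Python) =====
-- def wideofplate(array):
--     c0 = array.count("0")
--     c1 = array.count("1")
--     return 1 + 5 * c0 + 3 * c1 + 4 * (len(array) - c0 - c1)
-- ===== Notes on version B (the rewrite author's own statement) =====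
-- stated objective: alternative
-- what changed: Replaced the single per-element branching accumulation loop with counting the '0' and '1' occurrences once and combining the counts in one closed-form arithmetic expression.
import Mathlib
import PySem

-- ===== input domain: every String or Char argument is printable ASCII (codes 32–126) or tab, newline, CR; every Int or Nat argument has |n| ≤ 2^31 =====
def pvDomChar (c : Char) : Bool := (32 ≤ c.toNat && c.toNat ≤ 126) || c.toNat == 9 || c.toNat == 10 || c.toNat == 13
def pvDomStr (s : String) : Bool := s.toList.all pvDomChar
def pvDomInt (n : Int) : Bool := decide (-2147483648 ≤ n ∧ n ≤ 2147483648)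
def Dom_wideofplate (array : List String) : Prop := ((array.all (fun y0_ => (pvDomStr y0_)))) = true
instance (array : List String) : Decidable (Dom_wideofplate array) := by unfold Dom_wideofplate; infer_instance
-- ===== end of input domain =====

-- ===== PORT A =====
-- Header: B counts "0" and "1" once and combines the counts arithmetically (alternative decomposition).
def wideofplate (array : List String) : Int :=
  array.foldl (fun w i => if i = "0" then w + 5 else if i = "1" then w + 3 else w + 4) 1

-- ===== PORT B =====
def wideofplate_alt (array : List String) : Int :=
  let c0 : Int := PySem.List.count array "0"
  let c1 : Int := PySem.List.count array "1"
  1 + 5 * c0 + 3 * c1 + 4 * ((array.length : Int) - c0 - c1)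

-- ===== PRECONDITION & SPEC =====
def Spec_wideofplate (array : List String) (out : Int) : Prop := out = wideofplate_alt array
instance (array : List String) (out : Int) : Decidable (Spec_wideofplate array out) := by unfold Spec_wideofplate; infer_instance

-- ===== CLAIM (what is proved, stated in full; the proofs are below) =====
def Claim_equal_wideofplate : Prop := ∀ (array : List String), Dom_wideofplate array → Spec_wideofplate array (wideofplate array)

-- ===== LEMMAS AND PROOFS =====

-- ===== VERDICT (by name: the statement is the Claim_ definition above) =====
lemma wideofplate_aux (array : List String) (w : Int) :
    array.foldl (fun w i => if i = "0" then w + 5 else if i = "1" then w + 3 else w + 4) w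
      = w + 5 * PySem.List.count array "0" + 3 * PySem.List.count array "1"
        + 4 * ((array.length : Int) - PySem.List.count array "0" - PySem.List.count array "1") := by
  induction array generalizing w with
  | nil => simp [PySem.List.count]
  | cons x xs ih =>
    simp only [List.foldl_cons, ih, PySem.List.count, List.count_cons, List.length_cons]
    by_cases h0 : x = "0" <;> by_cases h1 : x = "1" <;>
      simp [h0, h1] <;> push_cast <;> ring

theorem wideofplate_spec : Claim_equal_wideofplate := by
  intro array _
  unfold Spec_wideofplate wideofplate wideofplate_alt
  simp only [wideofplate_aux]
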